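-- pv_equiv track=rewrite | github.com/doing-work/mdconv | mdconv/converters/pptx.py | _detect_slide_level
-- ===== SOURCE A (Python) =====
-- def _detect_slide_level(content: str) -> int:
--     """
--     Auto-detect the appropriate slide level based on heading structure.
--
--     Args:
--         content: Markdown content
--
--     Returns:
--         Detected slide level (1 or 2)
--     """
--     lines = content.split("\n")
--     heading_levels = []
--
--     for line in lines:
--         stripped = line.strip()
--         if stripped.startswith("#"):
--             # Count leading # to determine heading level
--             level = len(stripped) - len(stripped.lstrip("#"))
--             if level > 0 and level <= 6:
--                 heading_levels.append(level)
--
--     if not heading_levels: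
--         return 1  # Default to level 1
--
--     # Find the most common heading level (excluding the first heading if it's a title)
--     # If we have multiple level 2+ headings, use level 2
--     level_2_count = sum(1 for level in heading_levels if level == 2)
--     level_1_count = sum(1 for level in heading_levels if level == 1)
--
--     # If there are multiple level 2 headings and only one (or no) level 1 heading,
--     # it's likely that level 2 should be the slide level
--     if level_2_count > 1 and level_1_count <= 1:
--         return 2
--
--     # Otherwise, default to level 1
--     return 1
-- ===== SOURCE B (Python) =====
-- def _detect_slide_level(content: str) -> int:
--     # Character-level scanner: walk the raw string once with an index, without
--     # building a line list or calling strip/lstrip; classify each heading by the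
--     # run of '#' after the line's leading whitespace.
--     h1 = h2 = other = 0
--     i = 0
--     n = len(content)
--     while i < n:
--         # skip the line's leading whitespace (never crossing the newline)
--         while i < n and content[i] != "\n" and content[i].isspace():
--             i += 1
--         if i < n and content[i] == "#":
--             run = 0
--             while i < n and content[i] == "#":
--                 run += 1
--                 i += 1
--             if run <= 6:
--                 if run == 1:
--                     h1 += 1
--                 elif run == 2:
--                     h2 += 1
--                 else:
--                     other += 1
--         # skip the rest of the line and the newline itself
--         while i < n and content[i] != "\n":
--             i += 1
--         i += 1
--     if h1 + h2 + other == 0: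
--         return 1
--     return 2 if h2 > 1 and h1 <= 1 else 1
-- ===== Notes on version B (the rewrite author's own statement) =====
-- stated objective: alternative
-- what changed: B replaces A's split-into-lines + strip/lstrip string operations + heading-level list + two sum passes by a single character-level scanner that walks the raw string once with an index, skipping each line's leading whitespace, counting the run of heading markers directly and maintaining three counters.
import Mathlib
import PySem

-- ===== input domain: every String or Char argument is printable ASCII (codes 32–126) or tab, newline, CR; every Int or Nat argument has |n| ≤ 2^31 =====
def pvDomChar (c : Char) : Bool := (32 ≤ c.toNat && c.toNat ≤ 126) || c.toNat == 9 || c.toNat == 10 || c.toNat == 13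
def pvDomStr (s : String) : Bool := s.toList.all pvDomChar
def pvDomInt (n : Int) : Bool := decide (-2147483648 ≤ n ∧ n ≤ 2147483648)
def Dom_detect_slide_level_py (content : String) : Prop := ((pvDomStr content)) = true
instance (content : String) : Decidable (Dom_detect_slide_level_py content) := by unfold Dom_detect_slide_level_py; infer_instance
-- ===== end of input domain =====

-- B replaces A's split-into-lines + strip/lstrip + list of heading levels + two sum
-- passes by a single character-level scanner over the raw string (objective: alternative).

-- ===== PORT A =====
-- loop body of A: append the heading level (if any) of one line to the accumulated list
def pvStepA (acc : List Int) (line : List Char) : List Int :=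
  let stripped := PySem.Chars.strip line
  if PySem.Chars.startswith stripped ['#'] then
    -- stripped.lstrip("#") ported by hand (exact): drop the leading '#' characters
    let level : Int := PySem.Chars.len stripped - PySem.Chars.len (stripped.dropWhile (· == '#'))
    if 0 < level ∧ level ≤ 6 then acc ++ [level] else acc
  else acc

def detect_slide_level_py (content : String) : Int :=
  let lines := PySem.Chars.splitOn content.toList ['\n']
  let heading_levels := lines.foldl pvStepA []
  if heading_levels = [] then 1
  else
    let level_2_count := (heading_levels.map (fun level => if level = 2 then (1 : Int) else 0)).sum
    let level_1_count := (heading_levels.map (fun level => if level = 1 then (1 : Int) else 0)).sum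
    if level_2_count > 1 ∧ level_1_count ≤ 1 then 2 else 1

-- ===== PORT B =====
-- Source B's while loop over the index i, transcribed as structural recursion on the
-- remaining characters; state = (h1, h2, other).
def pvScanB : List Char → Int × Int × Int → Int × Int × Int
  | [], st => st
  | c :: cs, st =>
    -- skip the line's leading whitespace (never crossing the newline)
    let cs1 := List.dropWhile (fun a => a != '\n' && PySem.Chars.isspace a) (c :: cs)
    -- count the run of '#' (run = 0 exactly when content[i] != '#')
    let run := (List.takeWhile (fun a => a == '#') cs1).length
    let st' :=
      if 1 ≤ run then
        if run ≤ 6 then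
          if run = 1 then (st.1 + 1, st.2.1, st.2.2)
          else if run = 2 then (st.1, st.2.1 + 1, st.2.2)
          else (st.1, st.2.1, st.2.2 + 1)
        else st
      else st
    let cs2 := List.dropWhile (fun a => a == '#') cs1
    -- skip the rest of the line and the newline itself
    let cs3 := List.dropWhile (fun a => a != '\n') cs2
    pvScanB (cs3.drop 1) st'
  termination_by cs _ => cs.length
  decreasing_by
    have h1 := List.length_dropWhile_le (fun a => a != '\n' && PySem.Chars.isspace a) (c :: cs)
    have h2 := List.length_dropWhile_le (fun a => a == '#')
      (List.dropWhile (fun a => a != '\n' && PySem.Chars.isspace a) (c :: cs))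
    have h3 := List.length_dropWhile_le (fun a => a != '\n')
      (List.dropWhile (fun a => a == '#')
        (List.dropWhile (fun a => a != '\n' && PySem.Chars.isspace a) (c :: cs)))
    simp only [List.length_drop, List.length_cons] at *
    omega

def detect_slide_level_py_alt (content : String) : Int :=
  let st := pvScanB content.toList (0, 0, 0)
  if st.1 + st.2.1 + st.2.2 = 0 then 1
  else if st.2.1 > 1 ∧ st.1 ≤ 1 then 2 else 1

-- ===== PRECONDITION & SPEC =====
def Spec_detect_slide_level_py (content : String) (out : Int) : Prop := out = detect_slide_level_py_alt content
instance (content : String) (out : Int) : Decidable (Spec_detect_slide_level_py content out) := by unfold Spec_detect_slide_level_py; infer_instance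

-- ===== CLAIM (what is proved, stated in full; the proofs are below) =====
def Claim_equal_detect_slide_level_py : Prop := ∀ (content : String), Dom_detect_slide_level_py content → Spec_detect_slide_level_py content (detect_slide_level_py content)

-- ===== LEMMAS AND PROOFS =====

-- the per-line effect of one iteration of B's scanner (proof-side helper)
def pvLineF (st : Int × Int × Int) (t : List Char) : Int × Int × Int :=
  let u := List.dropWhile (fun a => a != '\n' && PySem.Chars.isspace a) t
  let run := (List.takeWhile (fun a => a == '#') u).length
  if 1 ≤ run then
    if run ≤ 6 then
      if run = 1 then (st.1 + 1, st.2.1, st.2.2)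
      else if run = 2 then (st.1, st.2.1 + 1, st.2.2)
      else (st.1, st.2.1, st.2.2 + 1)
    else st
  else st

-- abstraction map from A's accumulated list of levels to B's counter state
def pvAbs3 (acc : List Int) : Int × Int × Int :=
  ((acc.map (fun l => if l = 1 then (1 : Int) else 0)).sum,
   (acc.map (fun l => if l = 2 then (1 : Int) else 0)).sum,
   (acc.map (fun l => if l = 1 ∨ l = 2 then (0 : Int) else 1)).sum)

theorem pvDropWhileCongrMem {p q : Char → Bool} (l : List Char)
    (h : ∀ a ∈ l, p a = q a) : l.dropWhile p = l.dropWhile q := by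
  induction l with
  | nil => rfl
  | cons a l ih =>
    have ha := h a (by simp)
    by_cases hpa : p a = true
    · rw [List.dropWhile_cons_of_pos hpa, List.dropWhile_cons_of_pos (ha ▸ hpa)]
      exact ih (fun b hb => h b (by simp [hb]))
    · rw [List.dropWhile_cons_of_neg hpa, List.dropWhile_cons_of_neg (ha ▸ hpa)]

theorem pvDropWhileHead {p : Char → Bool} {l r : List Char} {x : Char}
    (h : l.dropWhile p = x :: r) : p x = false := by
  induction l with
  | nil => simp at h
  | cons a l ih =>
    by_cases hpa : p a = true
    · rw [List.dropWhile_cons_of_pos hpa] at h; exact ih h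
    · rw [List.dropWhile_cons_of_neg hpa] at h
      cases h; simpa using hpa

theorem pvTakeWhileAppendFalse {p : Char → Bool} (v w : List Char)
    (hw : ∀ a ∈ w, p a = false) : List.takeWhile p (v ++ w) = List.takeWhile p v := by
  rw [List.takeWhile_append]
  split_ifs with h
  · have hv : List.takeWhile p v = v :=
      (List.takeWhile_prefix p).eq_of_length h
    have hwnil : List.takeWhile p w = [] := by
      cases w with
      | nil => rfl
      | cons b w' =>
        rw [List.takeWhile_cons_of_neg]
        simp [hw b (by simp)]
    rw [hwnil, hv, List.append_nil]
  · rfl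

theorem pvDropWhileAppendNl {p : Char → Bool} (hp : p '\n' = false) (t r : List Char) :
    List.dropWhile p (t ++ '\n' :: r) = List.dropWhile p t ++ '\n' :: r := by
  rw [List.dropWhile_append]
  split_ifs with h
  · rw [List.isEmpty_iff] at h
    rw [h, List.nil_append, List.dropWhile_cons_of_neg (by simp [hp])]
  · rfl

-- splitOnP facts
theorem pvSplitOnPNoSep {p : Char → Bool} : ∀ (cs t : List Char),
    t ∈ List.splitOnP p cs → ∀ a ∈ t, p a = false := by
  intro cs
  induction cs with
  | nil => intro t ht a ha; rw [List.splitOnP_nil] at ht; simp at ht; simp [ht] at ha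
  | cons c cs ih =>
    intro t ht a ha
    rw [List.splitOnP_cons] at ht
    by_cases hc : p c = true
    · rw [if_pos hc] at ht
      rcases List.mem_cons.mp ht with h | h
      · simp [h] at ha
      · exact ih t h a ha
    · rw [if_neg hc] at ht
      obtain ⟨h, tl, hmk⟩ := List.exists_cons_of_ne_nil (List.splitOnP_ne_nil p cs)
      rw [hmk] at ht
      simp only [List.modifyHead, List.mem_cons] at ht
      rcases ht with h1 | h1
      · subst h1
        rcases List.mem_cons.mp ha with h2 | h2
        · subst h2; simpa using hc
        · exact ih h (by rw [hmk]; simp) a h2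
      · exact ih t (by rw [hmk]; simp [h1]) a ha

theorem pvSplitOnPAll {p : Char → Bool} : ∀ (cs : List Char),
    (∀ a ∈ cs, p a = false) → List.splitOnP p cs = [cs] := by
  intro cs
  induction cs with
  | nil => intro _; exact List.splitOnP_nil p
  | cons c cs ih =>
    intro h
    rw [List.splitOnP_cons, if_neg (by simp [h c (by simp)]),
      ih (fun a ha => h a (by simp [ha]))]
    rfl

theorem pvSplitOnPAppend {p : Char → Bool} (hx : p '\n' = true) : ∀ (t r : List Char),
    (∀ a ∈ t, p a = false) → List.splitOnP p (t ++ '\n' :: r) = t :: List.splitOnP p r := by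
  intro t
  induction t with
  | nil => intro r _; rw [List.nil_append, List.splitOnP_cons, if_pos hx]
  | cons c t ih =>
    intro r h
    rw [List.cons_append, List.splitOnP_cons, if_neg (by simp [h c (by simp)]),
      ih r (fun a ha => h a (by simp [ha]))]
    rfl

-- PySem.Chars.splitOn with a one-character separator is List.splitOnP
theorem pvGoSpec : ∀ (fuel : Nat) (l cur : List Char) (acc : List (List Char)),
    l.length ≤ fuel →
    PySem.Chars.splitOn.go ['\n'] fuel l cur acc
      = acc.reverse ++ (List.splitOnP (fun a => a == '\n') l).modifyHead (cur.reverse ++ ·) := by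
  intro fuel
  induction fuel with
  | zero =>
    intro l cur acc hl
    have : l = [] := List.length_eq_zero_iff.mp (Nat.le_zero.mp hl)
    subst this
    simp [PySem.Chars.splitOn.go, List.splitOnP_nil]
  | succ fuel ih =>
    intro l cur acc hl
    cases l with
    | nil => simp [PySem.Chars.splitOn.go, List.splitOnP_nil]
    | cons c rest =>
      rw [List.splitOnP_cons]
      by_cases hc : c = '\n'
      · subst hc
        have hpre : List.isPrefixOf ['\n'] ('\n' :: rest) = true := by
          simp [List.isPrefixOf]
        simp only [PySem.Chars.splitOn.go, hpre, if_pos]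
        rw [show List.drop (['\n'] : List Char).length ('\n' :: rest) = rest from rfl]
        rw [ih rest [] (cur.reverse :: acc) (by simpa using Nat.le_of_succ_le_succ hl)]
        obtain ⟨h, tl, hmk⟩ := List.exists_cons_of_ne_nil
          (List.splitOnP_ne_nil (fun a => a == '\n') rest)
        simp [hmk]
      · have hpre : List.isPrefixOf ['\n'] (c :: rest) = false := by
          simp [List.isPrefixOf, Ne.symm hc]
        simp only [PySem.Chars.splitOn.go, hpre, Bool.false_eq_true, if_false]
        rw [ih rest (c :: cur) acc (by simpa using Nat.le_of_succ_le_succ hl)]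
        obtain ⟨h, tl, hmk⟩ := List.exists_cons_of_ne_nil
          (List.splitOnP_ne_nil (fun a => a == '\n') rest)
        simp [hmk, hc]

theorem pvSplitOnBridge (cs : List Char) :
    PySem.Chars.splitOn cs ['\n'] = List.splitOnP (fun a => a == '\n') cs := by
  unfold PySem.Chars.splitOn
  rw [pvGoSpec (cs.length + 1) cs [] [] (by omega)]
  obtain ⟨h, tl, hmk⟩ := List.exists_cons_of_ne_nil
    (List.splitOnP_ne_nil (fun a => a == '\n') cs)
  simp [hmk]

-- one step of B's scanner consumes exactly one '\n'-terminated line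
theorem pvScanBStep (t r : List Char) (st : Int × Int × Int) (ht : '\n' ∉ t) :
    pvScanB (t ++ '\n' :: r) st = pvScanB r (pvLineF st t) := by
  obtain ⟨c, cs, hcons⟩ : ∃ c cs, t ++ '\n' :: r = c :: cs := by
    cases t with
    | nil => exact ⟨'\n', r, rfl⟩
    | cons a t' => exact ⟨a, t' ++ '\n' :: r, rfl⟩
  rw [hcons]
  simp only [pvScanB]
  rw [← hcons]
  have h1 : List.dropWhile (fun a => a != '\n' && PySem.Chars.isspace a) (t ++ '\n' :: r)
      = List.dropWhile (fun a => a != '\n' && PySem.Chars.isspace a) t ++ '\n' :: r :=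
    pvDropWhileAppendNl (by simp) t r
  set u := List.dropWhile (fun a => a != '\n' && PySem.Chars.isspace a) t with hu
  have hun : '\n' ∉ u := fun hm => ht ((List.dropWhile_sublist _).subset hm)
  have h2 : List.takeWhile (fun a => a == '#') (u ++ '\n' :: r)
      = List.takeWhile (fun a => a == '#') u := by
    rw [List.takeWhile_append]
    split_ifs with h
    · rw [List.takeWhile_cons_of_neg (by simp), List.append_nil]
      exact ((List.takeWhile_prefix _).eq_of_length h).symm
    · rfl
  have h3 : List.dropWhile (fun a => a == '#') (u ++ '\n' :: r)
      = List.dropWhile (fun a => a == '#') u ++ '\n' :: r :=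
    pvDropWhileAppendNl (by simp) u r
  set v := List.dropWhile (fun a => a == '#') u with hv
  have hvn : '\n' ∉ v := fun hm => hun ((List.dropWhile_sublist _).subset hm)
  have h4 : List.dropWhile (fun a => a != '\n') (v ++ '\n' :: r) = '\n' :: r := by
    rw [pvDropWhileAppendNl (by simp) v r]
    rw [List.dropWhile_eq_nil_iff.mpr (fun a ha => by simp; exact fun h => hvn (h ▸ ha))]
    rfl
  rw [h1, h2, h3, h4]
  simp only [pvLineF, List.drop_succ_cons, List.drop_zero]
  rw [← hu]

theorem pvScanSplit : ∀ (n : Nat) (cs : List Char), cs.length ≤ n → ∀ st,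
    pvScanB cs st = (List.splitOnP (fun a => a == '\n') cs).foldl pvLineF st := by
  intro n
  induction n with
  | zero =>
    intro cs hcs st
    have : cs = [] := List.length_eq_zero_iff.mp (Nat.le_zero.mp hcs)
    subst this
    simp [pvScanB, List.splitOnP_nil, pvLineF]
  | succ n ih =>
    intro cs hcs st
    by_cases hin : '\n' ∈ cs
    · have hsplit : cs = cs.takeWhile (fun a => a != '\n') ++ cs.dropWhile (fun a => a != '\n') :=
        (List.takeWhile_append_dropWhile).symm
      set t := cs.takeWhile (fun a => a != '\n') with htdef
      set d := cs.dropWhile (fun a => a != '\n') with hddef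
      have htn : '\n' ∉ t := by
        intro hm
        have := List.mem_takeWhile_imp hm
        simp at this
      have hdn : '\n' ∈ d := by
        rcases List.mem_append.mp (hsplit ▸ hin) with h | h
        · exact absurd h htn
        · exact h
      obtain ⟨x, r, hxr⟩ := List.exists_cons_of_ne_nil (List.ne_nil_of_mem hdn)
      have hx : x = '\n' := by
        have := pvDropWhileHead (hddef.symm ▸ hxr)
        simpa using this
      subst hx
      have hcs' : cs = t ++ '\n' :: r := by rw [hsplit, hxr]
      rw [hcs', pvScanBStep t r st htn,
        pvSplitOnPAppend (by simp) t r (fun a ha => by simp; exact fun h => htn (h ▸ ha)),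
        List.foldl_cons]
      apply ih
      have : cs.length = t.length + 1 + r.length := by simp [hcs']; omega
      omega
    · rw [pvSplitOnPAll cs (fun a ha => by simp; exact fun h => hin (h ▸ ha))]
      cases cs with
      | nil => simp [pvScanB, pvLineF]
      | cons c cs' =>
        simp only [pvScanB]
        have hall : ∀ a ∈ List.dropWhile (fun a => a == '#')
            (List.dropWhile (fun a => a != '\n' && PySem.Chars.isspace a) (c :: cs')),
            (fun a => a != '\n') a = true := by
          intro a ha
          have : a ∈ c :: cs' :=
            ((List.dropWhile_sublist _).trans (List.dropWhile_sublist _)).subset ha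
          simp
          exact fun h => hin (h ▸ this)
        rw [List.dropWhile_eq_nil_iff.mpr hall]
        simp [pvScanB, pvLineF]

-- '#'-run facts about A's strip
theorem pvRstripHash (u : List Char) :
    List.takeWhile (fun a => a == '#') (PySem.Chars.rstrip u)
      = List.takeWhile (fun a => a == '#') u := by
  have hdec : u = PySem.Chars.rstrip u ++ (List.takeWhile PySem.Chars.isspace u.reverse).reverse := by
    unfold PySem.Chars.rstrip
    conv_lhs => rw [← List.reverse_reverse u,
      ← List.takeWhile_append_dropWhile (p := PySem.Chars.isspace) (l := u.reverse)]
    rw [List.reverse_append]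
  conv_rhs => rw [hdec]
  rw [pvTakeWhileAppendFalse]
  intro a ha
  have hws : PySem.Chars.isspace a = true :=
    List.mem_takeWhile_imp (List.mem_reverse.mp ha)
  have : a ≠ '#' := by
    intro h; subst h; simp [PySem.Chars.isspace] at hws
  simp [this]

theorem pvStartswithHashIff (s : List Char) :
    PySem.Chars.startswith s ['#'] = true ↔ 1 ≤ (List.takeWhile (fun a => a == '#') s).length := by
  cases s with
  | nil => simp [PySem.Chars.startswith, List.isPrefixOf]
  | cons c cs =>
    by_cases hc : c = '#'
    · subst hc
      simp [PySem.Chars.startswith, List.isPrefixOf, List.takeWhile_cons_of_pos]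
    · rw [List.takeWhile_cons_of_neg (by simp [hc])]
      simp [PySem.Chars.startswith, List.isPrefixOf, Ne.symm hc]

-- A's per-line step, re-expressed through the '#'-run after the leading whitespace
theorem pvStepAChar (acc : List Int) (t : List Char) :
    pvStepA acc t =
      (if 1 ≤ (List.takeWhile (fun a => a == '#') (List.dropWhile PySem.Chars.isspace t)).length ∧
          (List.takeWhile (fun a => a == '#') (List.dropWhile PySem.Chars.isspace t)).length ≤ 6
       then acc ++ [((List.takeWhile (fun a => a == '#')
              (List.dropWhile PySem.Chars.isspace t)).length : Int)]
       else acc) := by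
  unfold pvStepA
  set u := List.dropWhile PySem.Chars.isspace t with hu
  set R := (List.takeWhile (fun a => a == '#') u).length with hRdef
  have hstrip : PySem.Chars.strip t = PySem.Chars.rstrip u := rfl
  have hrun : List.takeWhile (fun a => a == '#') (PySem.Chars.strip t)
      = List.takeWhile (fun a => a == '#') u := by rw [hstrip, pvRstripHash]
  have hsw := pvStartswithHashIff (PySem.Chars.strip t)
  rw [hrun, ← hRdef] at hsw
  have hlen : (PySem.Chars.strip t).length
      = R + (List.dropWhile (fun a => a == '#') (PySem.Chars.strip t)).length := by
    conv_lhs => rw [← List.takeWhile_append_dropWhile (p := fun a => a == '#')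
      (l := PySem.Chars.strip t)]
    rw [List.length_append, hrun, ← hRdef]
  have hlev : (PySem.Chars.len (PySem.Chars.strip t) : Int)
      - PySem.Chars.len (List.dropWhile (fun a => a == '#') (PySem.Chars.strip t)) = (R : Int) := by
    simp only [PySem.Chars.len_eq]
    omega
  by_cases hs : 1 ≤ R
  · rw [if_pos (hsw.mpr hs)]
    simp only [hlev]
    by_cases h6 : R ≤ 6
    · rw [if_pos ⟨by exact_mod_cast hs, by exact_mod_cast h6⟩, if_pos ⟨hs, h6⟩]
    · rw [if_neg (by omega), if_neg (by omega)]
  · rw [if_neg (by simp [hsw]; omega), if_neg (by omega)]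

theorem pvLineComm (acc : List Int) (t : List Char) (ht : '\n' ∉ t) :
    pvLineF (pvAbs3 acc) t = pvAbs3 (pvStepA acc t) := by
  have hq : List.dropWhile (fun a => a != '\n' && PySem.Chars.isspace a) t
      = List.dropWhile PySem.Chars.isspace t := by
    apply pvDropWhileCongrMem
    intro a ha
    have : a ≠ '\n' := fun h => ht (h ▸ ha)
    simp [this]
  rw [pvStepAChar]
  unfold pvLineF
  rw [hq]
  set R := (List.takeWhile (fun a => a == '#') (List.dropWhile PySem.Chars.isspace t)).length
    with hRdef
  by_cases hs : 1 ≤ R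
  · by_cases h6 : R ≤ 6
    · rw [if_pos hs, if_pos h6, if_pos (show 1 ≤ R ∧ R ≤ 6 from ⟨hs, h6⟩)]
      by_cases h1 : R = 1
      · rw [if_pos h1, h1]
        simp [pvAbs3]
      · by_cases h2 : R = 2
        · rw [if_neg h1, if_pos h2, h2]
          simp [pvAbs3]
        · rw [if_neg h1, if_neg h2]
          have hc1 : ((R : Int)) ≠ 1 := by exact_mod_cast h1
          have hc2 : ((R : Int)) ≠ 2 := by exact_mod_cast h2
          simp [pvAbs3, hc1, hc2]
    · rw [if_pos hs, if_neg h6, if_neg (by omega)]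
  · rw [if_neg hs, if_neg (by omega)]

theorem pvFoldComm : ∀ (lines : List (List Char)) (acc : List Int),
    (∀ t ∈ lines, '\n' ∉ t) →
    lines.foldl pvLineF (pvAbs3 acc) = pvAbs3 (lines.foldl pvStepA acc) := by
  intro lines
  induction lines with
  | nil => intro acc _; rfl
  | cons l ls ih =>
    intro acc h
    rw [List.foldl_cons, List.foldl_cons, pvLineComm acc l (h l (by simp))]
    exact ih _ (fun t htl => h t (by simp [htl]))

theorem pvSumNonneg (f : Int → Int) (h : ∀ l, 0 ≤ f l) (acc : List Int) :
    0 ≤ (acc.map f).sum := by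
  induction acc with
  | nil => simp
  | cons l acc ih => simp only [List.map_cons, List.sum_cons]; have := h l; omega

theorem pvTotal (acc : List Int) :
    (pvAbs3 acc).1 + (pvAbs3 acc).2.1 + (pvAbs3 acc).2.2 = (acc.length : Int) := by
  induction acc with
  | nil => simp [pvAbs3]
  | cons l acc ih =>
    simp only [pvAbs3, List.map_cons, List.sum_cons, List.length_cons] at *
    split_ifs at * <;> push_cast at * <;> omega

-- ===== VERDICT (by name: the statement is the Claim_ definition above) =====
theorem detect_slide_level_py_spec : Claim_equal_detect_slide_level_py := by
  intro content _
  unfold Spec_detect_slide_level_py detect_slide_level_py detect_slide_level_py_alt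
  dsimp only
  rw [pvSplitOnBridge, pvScanSplit content.toList.length content.toList le_rfl]
  have habs0 : ((0 : Int), (0 : Int), (0 : Int)) = pvAbs3 [] := by simp [pvAbs3]
  rw [habs0, pvFoldComm _ [] (fun t htl hmem => by
    have := pvSplitOnPNoSep content.toList t htl '\n' hmem
    simp at this)]
  set acc := (List.splitOnP (fun a => a == '\n') content.toList).foldl pvStepA [] with hacc
  by_cases hnil : acc = []
  · simp [hnil, pvAbs3]
  · have hlen := List.length_pos_iff.mpr hnil
    have htot := pvTotal acc
    have h1 := pvSumNonneg (fun l => if l = 1 then (1 : Int) else 0) (fun l => by dsimp only; split <;> omega) acc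
    have h2 := pvSumNonneg (fun l => if l = 2 then (1 : Int) else 0) (fun l => by dsimp only; split <;> omega) acc
    have h3 := pvSumNonneg (fun l => if l = 1 ∨ l = 2 then (0 : Int) else 1) (fun l => by dsimp only; split <;> omega) acc
    simp only [pvAbs3] at htot h1 h2 h3 ⊢
    rw [if_neg hnil]
    split_ifs <;> omega
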